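-- pv_equiv track=rewrite | github.com/idseth/pwrechotel | GeneraDatasetLiv1.py | genera_varianti
-- ===== SOURCE A (Python) =====
-- import itertools   # Strumenti per lavorare con iteratori e combinazioni. Serve soprattutto a generare combinazioni di varianti
--
-- def genera_varianti(frase):
--     parti = []                             # parti conterrà una lista di liste
--     for token in frase.split():            # Separa la frase in token
--         if '/' in token:                   # e cerca all'interno dei token il carattere /
--             varianti = token.split('/')    # Separa le varianti
--             parti.append(varianti)
--         else:
--             parti.append([token])
--     combinazioni = list(itertools.product(*parti))               # l'* spacchetta la lista di liste e intertools.product ne fa il prodotto cartesiano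
--     frasi_generate = [' '.join(comb) for comb in combinazioni]   # list comprehension: riassembla le tuple contenute in "combinazioni"
--     return frasi_generate
-- ===== SOURCE B (Python) =====
-- def genera_varianti(frase):
--     # Mixed-radix index enumeration: count the combinations, then decode each
--     # index i into one choice per token (rightmost token = least-significant
--     # digit), with no Cartesian-product construction at all.
--     gruppi = [t.split('/') if '/' in t else [t] for t in frase.split()]
--     totale = 1
--     for g in gruppi:
--         totale *= len(g)
--     frasi = []
--     for i in range(totale):
--         parole = []
--         rem = i
--         for g in reversed(gruppi):
--             rem, d = divmod(rem, len(g))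
--             parole.append(g[d])
--         parole.reverse()
--         frasi.append(' '.join(parole))
--     return frasi
-- ===== Notes on version B (the rewrite author's own statement) =====
-- stated objective: alternative
-- what changed: Replaces itertools.product plus a join comprehension by mixed-radix index decoding: B multiplies the variant counts to get the total, then for each index i extracts one variant per token by repeated divmod (rightmost token = least-significant digit), so no Cartesian-product structure is ever built.
import Mathlib
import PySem

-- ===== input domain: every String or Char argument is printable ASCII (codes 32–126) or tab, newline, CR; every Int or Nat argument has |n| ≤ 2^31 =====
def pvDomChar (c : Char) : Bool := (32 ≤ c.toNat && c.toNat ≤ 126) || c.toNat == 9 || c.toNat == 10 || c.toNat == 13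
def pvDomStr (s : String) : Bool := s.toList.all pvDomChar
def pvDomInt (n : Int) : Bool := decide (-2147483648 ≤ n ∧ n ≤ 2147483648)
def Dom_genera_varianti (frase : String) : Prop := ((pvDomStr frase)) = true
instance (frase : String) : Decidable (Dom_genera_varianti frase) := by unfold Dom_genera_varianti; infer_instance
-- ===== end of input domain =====

-- B replaces itertools.product over collected token lists by mixed-radix index decoding: it counts the combinations and decodes each index into one variant per token; objective: alternative.


-- ===== PORT A =====
def genera_varianti (frase : String) : List String :=
  -- for token in frase.split(): append token.split('/') or [token]
  let parti : List (List String) :=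
    (PySem.Str.split₀ frase).foldl (fun parti token =>
      if PySem.Str.isIn "/" token then
        parti ++ [(PySem.Str.split? token "/").getD []]   -- sep "/" ≠ "", so split? is always some
      else
        parti ++ [[token]]) []
  -- combinazioni = list(itertools.product(*parti))
  let combinazioni : List (List String) :=
    parti.foldl (fun acc varianti =>
      acc.flatMap (fun comb => varianti.map (fun v => comb ++ [v]))) [[]]
  -- [' '.join(comb) for comb in combinazioni]
  combinazioni.map (fun comb => PySem.Str.join " " comb)

-- ===== PORT B =====
def genera_varianti_alt (frase : String) : List String :=
  let gruppi : List (List String) :=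
    (PySem.Str.split₀ frase).map (fun t =>
      if PySem.Str.isIn "/" t then (PySem.Str.split? t "/").getD [] else [t])
  -- totale = 1; for g in gruppi: totale *= len(g)
  let totale : Int := gruppi.foldl (fun acc g => acc * (g.length : Int)) 1
  -- for i in range(totale): decode i into one word per token, rightmost fastest
  (PySem.List.pyRange 0 totale 1).foldl (fun frasi i =>
    let st :=
      gruppi.reverse.foldl (fun (st : List String × Int) g =>
        -- rem, d = divmod(rem, len(g)); parole.append(g[d]);
        -- len(g) ≥ 1 for every split result and 0 ≤ d < len(g), so divmod
        -- and g[d] never raise: floordiv/mod/pyGetD-with-default are exact here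
        (st.1 ++ [PySem.List.pyGetD g (PySem.Int.mod st.2 (g.length : Int)) ""],
         PySem.Int.floordiv st.2 (g.length : Int))) ([], i)
    -- parole.reverse(); frasi.append(' '.join(parole))
    frasi ++ [PySem.Str.join " " st.1.reverse]) []

-- ===== PRECONDITION & SPEC =====
def Spec_genera_varianti (frase : String) (out : List String) : Prop := out = genera_varianti_alt frase
instance (frase : String) (out : List String) : Decidable (Spec_genera_varianti frase out) := by unfold Spec_genera_varianti; infer_instance

-- ===== CLAIM (what is proved, stated in full; the proofs are below) =====
def Claim_equal_genera_varianti : Prop := ∀ (frase : String), Dom_genera_varianti frase → Spec_genera_varianti frase (genera_varianti frase)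

-- ===== LEMMAS AND PROOFS =====

-- proof-only helpers: Nat-level mixed-radix decoding and the combination count
def pvStep (st : List String × Nat) (g : List String) : List String × Nat :=
  (st.1 ++ [g.getD (st.2 % g.length) ""], st.2 / g.length)
def pvDec (gs : List (List String)) (k : Nat) : List String :=
  (gs.reverse.foldl pvStep ([], k)).1
def pvTot (gs : List (List String)) : Nat := gs.foldl (fun a g => a * g.length) 1

-- A's token loop (one appended group per token) is B's map over the tokens.
theorem pv_parti_eq (ts : List String) (l0 : List (List String)) :
    ts.foldl (fun parti token =>
      if PySem.Str.isIn "/" token then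
        parti ++ [(PySem.Str.split? token "/").getD []]
      else
        parti ++ [[token]]) l0
    = l0 ++ ts.map (fun t =>
        if PySem.Str.isIn "/" t then (PySem.Str.split? t "/").getD [] else [t]) := by
  induction ts generalizing l0 with
  | nil => simp
  | cons t ts ih =>
    rw [List.foldl_cons, ih, List.map_cons]
    split_ifs <;> simp

-- the decoding fold only appends words: a prefix factors out
theorem pvStep_prefix (l : List (List String)) (p : List String) (k : Nat) :
    l.foldl pvStep (p, k) = (p ++ (l.foldl pvStep ([], k)).1, (l.foldl pvStep ([], k)).2) := by
  induction l generalizing p k with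
  | nil => simp
  | cons g l ih =>
    simp only [List.foldl_cons]
    rw [ih, pvStep]
    conv_rhs => rw [ih]
    simp [pvStep]

theorem pv_range_mul (N m : Nat) :
    List.range (N * m) = (List.range N).flatMap (fun q => (List.range m).map (fun r => q * m + r)) := by
  induction N with
  | zero => simp
  | succ N ih =>
    rw [Nat.succ_mul, List.range_add, ih, List.range_succ]
    simp [List.flatMap_append]

theorem pv_map_range_getD {α : Type} (g : List String) (f : String → α) :
    (List.range g.length).map (fun r => f (g.getD r "")) = g.map f := by
  apply List.ext_getElem
  · simp
  · intro i h1 h2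
    simp only [List.length_map] at h2
    simp only [List.getElem_map, List.getElem_range]
    rw [List.getD_eq_getElem?_getD, List.getElem?_eq_getElem h2, Option.getD_some]

-- main lemma: A's Cartesian-product fold lists exactly the decoded indices
theorem pv_main (gs : List (List String)) :
    gs.foldl (fun acc varianti =>
      acc.flatMap (fun comb => varianti.map (fun v => comb ++ [v]))) [[]]
    = (List.range (pvTot gs)).map (fun k => (pvDec gs k).reverse) := by
  induction gs using List.reverseRecOn with
  | nil => simp [pvTot, pvDec]
  | append_singleton gs g ih =>
    rw [List.foldl_append, List.foldl_cons, List.foldl_nil, ih]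
    have htot : pvTot (gs ++ [g]) = pvTot gs * g.length := by
      simp only [pvTot, List.foldl_append, List.foldl_cons, List.foldl_nil]
    rcases Nat.eq_zero_or_pos g.length with hm | hm
    · rw [List.length_eq_zero_iff.mp hm] at htot ⊢
      simp [htot]
    · rw [htot, pv_range_mul, List.map_flatMap, List.flatMap_map]
      refine List.flatMap_congr ?_
      intro q hq
      rw [List.map_map]
      rw [← pv_map_range_getD g (fun v => (pvDec gs q).reverse ++ [v])]
      refine List.map_congr_left ?_
      intro r hr
      simp only [List.mem_range] at hr
      have hdec : pvDec (gs ++ [g]) (q * g.length + r)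
          = g.getD r "" :: pvDec gs q := by
        simp only [pvDec, List.reverse_append, List.reverse_singleton,
          List.singleton_append, List.foldl_cons]
        have h1 : (q * g.length + r) % g.length = r := by
          rw [Nat.mul_comm, Nat.add_comm, Nat.add_mul_mod_self_left, Nat.mod_eq_of_lt hr]
        have h2 : (q * g.length + r) / g.length = q := by
          rw [Nat.add_comm, Nat.add_mul_div_right _ _ hm, Nat.div_eq_of_lt hr]
          omega
        rw [pvStep]
        simp only [h1, h2, List.nil_append]
        rw [pvStep_prefix]
        simp
      simp [hdec]


-- bridge: B's Int-valued decoding loop computes the Nat-level pvDec fold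
theorem pv_dec_cast (l : List (List String)) (p : List String) (k : Nat) :
    l.foldl (fun (st : List String × Int) g =>
        (st.1 ++ [PySem.List.pyGetD g (PySem.Int.mod st.2 (g.length : Int)) ""],
         PySem.Int.floordiv st.2 (g.length : Int))) (p, (k : Int))
    = ((l.foldl pvStep (p, k)).1, ((l.foldl pvStep (p, k)).2 : Int)) := by
  induction l generalizing p k with
  | nil => simp
  | cons g l ih =>
    simp only [List.foldl_cons, PySem.Int.mod_natCast, PySem.Int.floordiv_natCast,
      PySem.List.pyGetD_natCast, pvStep]
    exact ih _ _

-- bridge: B's Int-valued total is the Nat-level product of sizes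
theorem pv_tot_cast (gs : List (List String)) (a : Nat) :
    gs.foldl (fun (acc : Int) g => acc * (g.length : Int)) (a : Int)
    = ((gs.foldl (fun a g => a * g.length) a : Nat) : Int) := by
  induction gs generalizing a with
  | nil => simp
  | cons g gs ih =>
    simp only [List.foldl_cons]
    rw [← Nat.cast_mul, ih]

-- ===== VERDICT (by name: the statement is the Claim_ definition above) =====
theorem genera_varianti_spec : Claim_equal_genera_varianti := by
  intro frase _
  unfold Spec_genera_varianti genera_varianti genera_varianti_alt
  dsimp only
  rw [pv_parti_eq, List.nil_append]
  set gs := (PySem.Str.split₀ frase).map (fun t =>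
      if PySem.Str.isIn "/" t then (PySem.Str.split? t "/").getD [] else [t]) with hgs
  rw [pv_main, List.map_map]
  have h1 : gs.foldl (fun (acc : Int) g => acc * (g.length : Int)) 1
      = ((pvTot gs : Nat) : Int) := by
    simpa using pv_tot_cast gs 1
  rw [h1]
  have h2 : PySem.List.pyRange 0 (pvTot gs : Int) 1
      = List.map (fun k : Nat => (k : Int)) (List.range (pvTot gs)) := by
    apply List.ext_getElem
    · simp [PySem.List.length_pyRange_one]
    · intro i hi1 hi2
      rw [PySem.List.getElem_pyRange_one]
      simp
  rw [h2]
  have h3 := PySem.List.foldl_append_singleton_eq_map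
    (fun (i : Int) => PySem.Str.join " "
      (gs.reverse.foldl (fun (st : List String × Int) g =>
        (st.1 ++ [PySem.List.pyGetD g (PySem.Int.mod st.2 (g.length : Int)) ""],
         PySem.Int.floordiv st.2 (g.length : Int))) ([], i)).1.reverse)
    (List.map (fun k : Nat => (k : Int)) (List.range (pvTot gs))) []
  simp only [List.nil_append] at h3
  rw [h3, List.map_map]
  refine List.map_congr_left ?_
  intro k _
  simp only [Function.comp]
  rw [pv_dec_cast]
  rfl
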